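-- pv_equiv track=rewrite | github.com/paf0186/llm_code_and_review_tools | gerrit_cli/gerrit_cli/sashiko_bridge.py | compute_vote
-- ===== SOURCE A (Python) =====
-- from typing import Any, Optional
--
-- SEVERITY_VOTES = {
--     "Critical": -2,
--     "High": -1,
--     "Medium": 0,
--     "Low": 0,
-- }
--
-- def compute_vote(findings: list[dict[str, Any]]) -> int:
--     """Compute a Code-Review vote based on findings severity."""
--     if not findings:
--         return 0  # No findings = no vote (don't auto-approve)
--
--     worst_severity = "Low"
--     severity_rank = {"Low": 0, "Medium": 1, "High": 2, "Critical": 3}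
--
--     for f in findings:
--         sev = f.get("severity", "Low")
--         if severity_rank.get(sev, 0) > severity_rank.get(worst_severity, 0):
--             worst_severity = sev
--
--     return SEVERITY_VOTES.get(worst_severity, 0)
-- ===== SOURCE B (Python) =====
-- def compute_vote(findings):
--     """Compute a Code-Review vote based on findings severity."""
--     present = {f.get("severity", "Low") for f in findings}
--     if "Critical" in present:
--         return -2
--     if "High" in present:
--         return -1
--     return 0
-- ===== Notes on version B (the rewrite author's own statement) =====
-- stated objective: simpler
-- what changed: B discards the worst-severity tracking loop, the severity_rank table and the SEVERITY_VOTES lookup entirely: it builds the set of severities present and returns -2/-1/0 by two membership checks, since only Critical and High carry nonzero votes and Critical dominates.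
import Mathlib
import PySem

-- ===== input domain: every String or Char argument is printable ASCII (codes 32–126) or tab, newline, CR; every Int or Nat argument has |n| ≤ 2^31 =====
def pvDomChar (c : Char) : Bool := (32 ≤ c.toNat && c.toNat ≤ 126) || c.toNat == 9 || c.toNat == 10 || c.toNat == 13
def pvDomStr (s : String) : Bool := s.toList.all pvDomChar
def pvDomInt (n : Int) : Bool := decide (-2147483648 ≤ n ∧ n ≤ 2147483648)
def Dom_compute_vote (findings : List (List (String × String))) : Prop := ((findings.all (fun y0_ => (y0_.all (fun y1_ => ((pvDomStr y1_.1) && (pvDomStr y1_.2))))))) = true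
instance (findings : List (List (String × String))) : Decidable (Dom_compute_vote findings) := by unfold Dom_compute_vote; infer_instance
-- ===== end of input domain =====

-- B replaces A's worst-severity tracking loop, rank table and vote lookup by building the set
-- of severities present and deciding the vote with two membership checks: simpler, same O(n).

-- ===== PORT A =====
-- module constant SEVERITY_VOTES (only A uses it)
def SEVERITY_VOTES : PySem.Dict String Int :=
  PySem.Dict.mk [("Critical", -2), ("High", -1), ("Medium", 0), ("Low", 0)]

-- A's local severity_rank table
def severity_rank : PySem.Dict String Int :=
  PySem.Dict.mk [("Low", 0), ("Medium", 1), ("High", 2), ("Critical", 3)]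

def compute_vote (findings : List (List (String × String))) : Int :=
  if findings = [] then 0
  else
    let worst :=
      findings.foldl
        (fun worst_severity f =>
          let sev := (PySem.Dict.mk f).getD "severity" "Low"
          if severity_rank.getD sev 0 > severity_rank.getD worst_severity 0 then sev
          else worst_severity)
        "Low"
    SEVERITY_VOTES.getD worst 0

-- ===== PORT B =====
def compute_vote_alt (findings : List (List (String × String))) : Int :=
  let present : PySem.Set String :=
    PySem.Set.ofList (findings.map (fun f => (PySem.Dict.mk f).getD "severity" "Low"))
  if PySem.Set.contains present "Critical" then -2
  else if PySem.Set.contains present "High" then -1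
  else 0

-- ===== PRECONDITION & SPEC =====
def Spec_compute_vote (findings : List (List (String × String))) (out : Int) : Prop := out = compute_vote_alt findings
instance (findings : List (List (String × String))) (out : Int) : Decidable (Spec_compute_vote findings out) := by unfold Spec_compute_vote; infer_instance

-- ===== CLAIM (what is proved, stated in full; the proofs are below) =====
def Claim_equal_compute_vote : Prop := ∀ (findings : List (List (String × String))), Dom_compute_vote findings → Spec_compute_vote findings (compute_vote findings)

-- ===== LEMMAS AND PROOFS =====

-- the severity extracted from one finding
def pvSev (f : List (String × String)) : String := (PySem.Dict.mk f).getD "severity" "Low"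

-- B's decision read off a list of severities
def pvVoteOf (l : List String) : Int :=
  if "Critical" ∈ l then -2 else if "High" ∈ l then -1 else 0

-- every string's (rank, vote) pair is one of the four table rows' (unknown strings behave as row 0)
theorem pv_classify (s : String) :
    (s ≠ "Critical" ∧ s ≠ "High" ∧ severity_rank.getD s 0 ≤ 1 ∧ SEVERITY_VOTES.getD s 0 = 0) ∨
    (s = "High" ∧ severity_rank.getD s 0 = 2 ∧ SEVERITY_VOTES.getD s 0 = -1) ∨
    (s = "Critical" ∧ severity_rank.getD s 0 = 3 ∧ SEVERITY_VOTES.getD s 0 = -2) := by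
  by_cases hL : s = "Low" <;> by_cases hM : s = "Medium" <;>
    by_cases hH : s = "High" <;> by_cases hC : s = "Critical" <;>
    simp_all [severity_rank, SEVERITY_VOTES, PySem.Dict.getD_eq_get?_getD,
      PySem.Dict.get?_mk_cons, Ne.symm]
  simp [PySem.Dict.get?]

-- the vote of A's update step is the min of the two votes
theorem pv_step_min (w sev : String) :
    SEVERITY_VOTES.getD
      (if severity_rank.getD sev 0 > severity_rank.getD w 0 then sev else w) 0
      = min (SEVERITY_VOTES.getD w 0) (SEVERITY_VOTES.getD sev 0) := by
  rcases pv_classify w with ⟨_, _, hrw, hvw⟩ | ⟨_, hrw, hvw⟩ | ⟨_, hrw, hvw⟩ <;>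
    rcases pv_classify sev with ⟨_, _, hrs, hvs⟩ | ⟨_, hrs, hvs⟩ | ⟨_, hrs, hvs⟩ <;>
    rw [apply_ite (fun x => SEVERITY_VOTES.getD x 0)] <;>
    split_ifs <;> try omega

-- A's fold, seen through the vote table, is a foldl min over the per-finding votes
theorem pv_fold_min (l : List (List (String × String))) (w : String) :
    SEVERITY_VOTES.getD
      (l.foldl
        (fun worst_severity f =>
          let sev := (PySem.Dict.mk f).getD "severity" "Low"
          if severity_rank.getD sev 0 > severity_rank.getD worst_severity 0 then sev
          else worst_severity)
        w) 0
    = (l.map (fun f => SEVERITY_VOTES.getD ((PySem.Dict.mk f).getD "severity" "Low") 0)).foldl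
        min (SEVERITY_VOTES.getD w 0) := by
  induction l generalizing w with
  | nil => rfl
  | cons x xs ih =>
    simp only [List.foldl_cons, List.map_cons]
    rw [ih, pv_step_min]

-- pvVoteOf is bounded
theorem pv_voteOf_bounds (l : List String) : -2 ≤ pvVoteOf l ∧ pvVoteOf l ≤ 0 := by
  unfold pvVoteOf; split_ifs <;> omega

-- the foldl min over per-severity votes equals B's membership decision
theorem pv_min_eq_voteOf (l : List String) (a : Int) (ha : a ≤ 0) :
    (l.map (fun s => SEVERITY_VOTES.getD s 0)).foldl min a = min a (pvVoteOf l) := by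
  induction l generalizing a with
  | nil => simp [pvVoteOf, min_eq_left ha]
  | cons s l ih =>
    simp only [List.map_cons, List.foldl_cons]
    rw [ih (min a (SEVERITY_VOTES.getD s 0))
        (by rcases pv_classify s with ⟨_, _, _, hv⟩ | ⟨_, _, hv⟩ | ⟨_, _, hv⟩ <;> omega),
      min_assoc]
    congr 1
    have hb := pv_voteOf_bounds l
    rcases pv_classify s with ⟨hC, hH, _, hv⟩ | ⟨hs, _, hv⟩ | ⟨hs, _, hv⟩ <;>
      simp only [hv, pvVoteOf, List.mem_cons] <;> split_ifs <;> simp_all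

-- ===== VERDICT (by name: the statement is the Claim_ definition above) =====
theorem compute_vote_spec : Claim_equal_compute_vote := by
  intro findings _
  unfold Spec_compute_vote compute_vote compute_vote_alt
  have hset : ∀ (s : String),
      PySem.Set.contains (PySem.Set.ofList (findings.map pvSev)) s = true ↔
        s ∈ findings.map pvSev := by
    intro s
    simp [PySem.Set.contains]
  cases findings with
  | nil => rfl
  | cons x xs =>
    simp only [if_neg (List.cons_ne_nil x xs)]
    rw [pv_fold_min]
    have h0 : SEVERITY_VOTES.getD "Low" 0 = 0 := by decide
    have : ((x :: xs).map (fun f => SEVERITY_VOTES.getD ((PySem.Dict.mk f).getD "severity" "Low") 0)) =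
        (((x :: xs).map pvSev).map (fun s => SEVERITY_VOTES.getD s 0)) := by
      simp [List.map_map, pvSev, Function.comp]
    rw [h0, this, pv_min_eq_voteOf _ 0 le_rfl, min_eq_right (pv_voteOf_bounds _).2]
    have hpv : (fun f => (PySem.Dict.mk f).getD "severity" "Low") = pvSev := rfl
    simp only [hpv]
    unfold pvVoteOf
    by_cases hc : "Critical" ∈ (x :: xs).map pvSev
    · rw [if_pos hc, if_pos ((hset "Critical").2 hc)]
    · rw [if_neg hc, if_neg (fun h => hc ((hset "Critical").1 h))]
      by_cases hh : "High" ∈ (x :: xs).map pvSev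
      · rw [if_pos hh, if_pos ((hset "High").2 hh)]
      · rw [if_neg hh, if_neg (fun h => hh ((hset "High").1 h))]
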